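-- pv_equiv track=rewrite | github.com/coreyt429/AdventOfCode | 2019/4/solution.py | check_passcode
-- ===== SOURCE A (Python) =====
-- def check_passcode(int_in, mode=1):
--     """
--     Function to check a passcode
--     Args:
--         int_in: int()
--     Returns:
--         bool()
--     """
--     # convert to string
--     work_str = str(int_in)
--     # init rool flags
--     has_repeating_digit = False
--     no_incrementing_values = True
--     # get length
--     length = len(work_str)
--     # walk characters
--     for idx, char in enumerate(work_str):
--         # if not the last char
--         if idx < length - 1:
--             # if the next char is smaller
--             if work_str[idx + 1] < char:
--                 # set flag
--                 no_incrementing_values = False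
--                 # no need to test this num further
--                 break
--             # if next char is the same
--             if char == work_str[idx + 1]:
--                 # part 2
--                 if mode == 2:
--                     # if the char after next matches, no go
--                     if idx < length - 2 and char == work_str[idx + 2]:
--                         continue
--                     # if the previous character matches, no go
--                     if idx > 0 and char == work_str[idx - 1]:
--                         continue
--                 # set flag
--                 has_repeating_digit = True
--     # return true if all conditions met
--     return all([has_repeating_digit, no_incrementing_values])
-- ===== SOURCE B (Python) =====
-- from itertools import groupby
--
--
-- def check_passcode(int_in, mode=1):
--     """Validate a passcode: digits non-decreasing plus a repeat rule
--     (mode 1: some run of equal digits of length >= 2; mode 2: exactly 2)."""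
--     work_str = str(int_in)
--     if list(work_str) != sorted(work_str):
--         return False
--     run_lengths = [len(list(group)) for _, group in groupby(work_str)]
--     if mode == 2:
--         return any(run == 2 for run in run_lengths)
--     return any(run >= 2 for run in run_lengths)
-- ===== Notes on version B (the rewrite author's own statement) =====
-- stated objective: simpler
-- what changed: Replaces A's single indexed scan with break/continue and neighbour lookups by a declarative decomposition: non-decreasing is checked as list(s) == sorted(s), and the repeat rule is read off the run lengths of consecutive equal characters (mode 2: some run == 2, otherwise: some run >= 2).
import Mathlib
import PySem

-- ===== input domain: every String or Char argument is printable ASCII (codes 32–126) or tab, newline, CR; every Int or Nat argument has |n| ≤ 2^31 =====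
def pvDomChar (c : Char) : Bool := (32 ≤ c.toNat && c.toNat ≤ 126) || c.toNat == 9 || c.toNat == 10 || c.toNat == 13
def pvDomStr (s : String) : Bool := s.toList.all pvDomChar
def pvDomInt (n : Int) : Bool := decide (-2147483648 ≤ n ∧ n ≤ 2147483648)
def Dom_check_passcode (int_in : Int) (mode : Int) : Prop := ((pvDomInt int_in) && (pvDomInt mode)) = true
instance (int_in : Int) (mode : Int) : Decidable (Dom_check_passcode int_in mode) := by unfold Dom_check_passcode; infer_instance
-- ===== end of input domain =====

-- B replaces A's indexed scan (break/continue, neighbour lookups) by a sorted-equality check plus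
-- run lengths of consecutive equal characters; objective: simpler.

-- ===== PORT A =====
-- A's `for idx, char in enumerate(work_str)` loop with its break/continue, carrying the two flags;
-- the break returns (hasRep, false); normal exhaustion returns (hasRep, true). The getD defaults are
-- never used: every index A reads is guarded in range, exactly as in the Python.
def pvA_loop (cs : List Char) (mode : Int) (length idx : Nat) (hasRep : Bool) : Bool × Bool :=
  if _h : idx < cs.length then
    let char : Char := cs.getD idx ' '
    if idx < length - 1 then
      if cs.getD (idx + 1) char < char then
        (hasRep, false)                                   -- break: no_incrementing_values = False
      else if char = cs.getD (idx + 1) char then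
        if mode = 2 then
          if idx < length - 2 ∧ char = cs.getD (idx + 2) char then
            pvA_loop cs mode length (idx + 1) hasRep      -- continue
          else if 0 < idx ∧ char = cs.getD (idx - 1) char then
            pvA_loop cs mode length (idx + 1) hasRep      -- continue
          else
            pvA_loop cs mode length (idx + 1) true        -- has_repeating_digit = True
        else
          pvA_loop cs mode length (idx + 1) true          -- has_repeating_digit = True
      else
        pvA_loop cs mode length (idx + 1) hasRep
    else
      pvA_loop cs mode length (idx + 1) hasRep
  else
    (hasRep, true)
  termination_by cs.length - idx
  decreasing_by all_goals omega

def check_passcode (int_in : Int) (mode : Int) : Bool :=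
  let work_str := PySem.Int.toChars int_in
  let p := pvA_loop work_str mode work_str.length 0 false
  p.1 && p.2                                              -- all([has_repeating_digit, no_incrementing_values])

-- ===== PORT B =====
-- run lengths of the groups of consecutive equal characters (itertools.groupby)
def pvRunsAux (c : Char) (n : Nat) : List Char → List Nat
  | [] => [n]
  | d :: rest => if d = c then pvRunsAux c (n + 1) rest else n :: pvRunsAux d 1 rest

def pvRunLengths : List Char → List Nat
  | [] => []
  | c :: rest => pvRunsAux c 1 rest

def check_passcode_alt (int_in : Int) (mode : Int) : Bool :=
  let work_str := PySem.Int.toChars int_in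
  if work_str ≠ PySem.List.sorted work_str (fun c => c) false then false
  else
    let run_lengths := pvRunLengths work_str
    if mode = 2 then run_lengths.any (fun run => run == 2)
    else run_lengths.any (fun run => decide (2 ≤ run))

-- ===== PRECONDITION & SPEC =====
def Spec_check_passcode (int_in : Int) (mode : Int) (out : Bool) : Prop := out = check_passcode_alt int_in mode
instance (int_in : Int) (mode : Int) (out : Bool) : Decidable (Spec_check_passcode int_in mode out) := by unfold Spec_check_passcode; infer_instance

-- ===== CLAIM (what is proved, stated in full; the proofs are below) =====
def Claim_equal_check_passcode : Prop := ∀ (int_in : Int) (mode : Int), Dom_check_passcode int_in mode → Spec_check_passcode int_in mode (check_passcode int_in mode)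

-- ===== LEMMAS AND PROOFS =====

-- structural restatement of A's loop: prev is the character just before the current suffix
def specA (mode : Int) : Option Char → List Char → Bool → Bool × Bool
  | _, [], hasRep => (hasRep, true)
  | _, [_], hasRep => (hasRep, true)
  | prev, c :: d :: rest, hasRep =>
    if d < c then (hasRep, false)
    else if c = d then
      if mode = 2 then
        if rest.head? = some c then specA mode (some c) (d :: rest) hasRep
        else if prev = some c then specA mode (some c) (d :: rest) hasRep
        else specA mode (some c) (d :: rest) true
      else specA mode (some c) (d :: rest) true
    else specA mode (some c) (d :: rest) hasRep

-- "some adjacent equal pair" / "some adjacent equal pair with different neighbours on both sides"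
def pvF1 : List Char → Bool
  | c :: d :: rest => (c == d) || pvF1 (d :: rest)
  | _ => false

def pvF2 : Option Char → List Char → Bool
  | prev, c :: d :: rest =>
      ((c == d) && !(rest.head? == some c) && !(prev == some c)) || pvF2 (some c) (d :: rest)
  | _, _ => false

theorem bridge (mode : Int) : ∀ (suf pre : List Char) (hasRep : Bool),
    pvA_loop (pre ++ suf) mode (pre ++ suf).length pre.length hasRep
      = specA mode pre.getLast? suf hasRep := by
  intro suf
  induction suf with
  | nil =>
    intro pre h
    rw [pvA_loop]
    simp [specA]
  | cons c suf' ih =>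
    intro pre h
    rw [pvA_loop]
    have hlt : pre.length < (pre ++ c :: suf').length := by
      simp only [List.length_append, List.length_cons]; omega
    rw [dif_pos hlt]
    have hchar : (pre ++ c :: suf').getD pre.length ' ' = c := by
      rw [List.getD_eq_getElem?_getD, List.getElem?_append_right (le_refl pre.length)]
      simp
    simp only [hchar]
    match suf' with
    | [] =>
      have hc2 : ¬ (pre.length < (pre ++ [c]).length - 1) := by
        simp only [List.length_append, List.length_cons, List.length_nil]; omega
      rw [if_neg hc2, pvA_loop]
      have hend : ¬ (pre.length + 1 < (pre ++ [c]).length) := by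
        simp only [List.length_append, List.length_cons, List.length_nil]; omega
      rw [dif_neg hend]
      simp [specA]
    | d :: rest =>
      have hc1 : pre.length < (pre ++ c :: d :: rest).length - 1 := by
        simp only [List.length_append, List.length_cons]; omega
      rw [if_pos hc1]
      have e1 : (pre ++ c :: d :: rest).getD (pre.length + 1) c = d := by
        rw [List.getD_eq_getElem?_getD, List.getElem?_append_right (by omega)]
        simp
      rw [e1]
      have e2 : (pre.length < (pre ++ c :: d :: rest).length - 2 ∧
          c = (pre ++ c :: d :: rest).getD (pre.length + 2) c) ↔ rest.head? = some c := by
        cases rest with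
        | nil =>
          simp only [List.length_append, List.length_cons, List.length_nil, List.head?_nil]
          constructor
          · rintro ⟨h1, _⟩
            exact absurd h1 (by omega)
          · intro h2
            exact absurd h2 (by simp)
        | cons r rest' =>
          have hg : (pre ++ c :: d :: r :: rest').getD (pre.length + 2) c = r := by
            rw [List.getD_eq_getElem?_getD, List.getElem?_append_right (by omega)]
            simp
          rw [hg, List.head?_cons]
          constructor
          · rintro ⟨_, h2⟩
            exact congrArg some h2.symm
          · intro h2
            exact ⟨by simp only [List.length_append, List.length_cons]; omega,
              (Option.some.inj h2).symm⟩
      have e3 : (0 < pre.length ∧ c = (pre ++ c :: d :: rest).getD (pre.length - 1) c) ↔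
          pre.getLast? = some c := by
        cases pre with
        | nil => simp
        | cons p pre' =>
          obtain ⟨x, hx⟩ := Option.isSome_iff_exists.mp
            (List.getLast?_isSome.mpr (List.cons_ne_nil p pre'))
          rw [List.getD_eq_getElem?_getD,
            List.getElem?_append_left (by simp only [List.length_cons]; omega),
            ← List.getLast?_eq_getElem?, hx]
          simp only [Option.getD_some, List.length_cons, Option.some.injEq]
          constructor
          · rintro ⟨_, h2⟩
            exact h2.symm
          · intro h2
            exact ⟨by omega, h2.symm⟩
      have hsplit : pre ++ c :: d :: rest = (pre ++ [c]) ++ d :: rest := by simp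
      have hlast : (pre ++ [c]).getLast? = some c := List.getLast?_concat
      simp only [specA]
      by_cases hdc : d < c
      · rw [if_pos hdc, if_pos hdc]
      · rw [if_neg hdc, if_neg hdc]
        by_cases hcd : c = d
        · rw [if_pos hcd, if_pos hcd]
          by_cases hm : mode = 2
          · rw [if_pos hm, if_pos hm]
            by_cases h1 : rest.head? = some c
            · rw [if_pos (e2.mpr h1), if_pos h1, hsplit]
              have hih := ih (pre ++ [c]) h
              rw [List.length_append] at hih ⊢
              rw [show pre.length + 1 = (pre ++ [c]).length by simp, hih, hlast]
            · rw [if_neg (fun hx2 => h1 (e2.mp hx2)), if_neg h1]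
              by_cases h2 : pre.getLast? = some c
              · rw [if_pos (e3.mpr h2), if_pos h2, hsplit]
                have hih := ih (pre ++ [c]) h
                rw [List.length_append] at hih ⊢
                rw [show pre.length + 1 = (pre ++ [c]).length by simp, hih, hlast]
              · rw [if_neg (fun hx2 => h2 (e3.mp hx2)), if_neg h2, hsplit]
                have hih := ih (pre ++ [c]) true
                rw [List.length_append] at hih ⊢
                rw [show pre.length + 1 = (pre ++ [c]).length by simp, hih, hlast]
          · rw [if_neg hm, if_neg hm, hsplit]
            have hih := ih (pre ++ [c]) true
            rw [List.length_append] at hih ⊢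
            rw [show pre.length + 1 = (pre ++ [c]).length by simp, hih, hlast]
        · rw [if_neg hcd, if_neg hcd, hsplit]
          have hih := ih (pre ++ [c]) h
          rw [List.length_append] at hih ⊢
          rw [show pre.length + 1 = (pre ++ [c]).length by simp, hih, hlast]

-- Bool-level "adjacent pairs are non-decreasing"
def pvNonDec : List Char → Bool
  | c :: d :: rest => decide (c ≤ d) && pvNonDec (d :: rest)
  | _ => true

theorem specA_snd (mode : Int) : ∀ (cs : List Char) (prev : Option Char) (hasRep : Bool),
    (specA mode prev cs hasRep).2 = pvNonDec cs := by
  intro cs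
  induction cs with
  | nil => intro prev h; simp [specA, pvNonDec]
  | cons c tl ih =>
    intro prev h
    cases tl with
    | nil => simp [specA, pvNonDec]
    | cons d rest =>
      simp only [specA, pvNonDec]
      by_cases hdc : d < c
      · rw [if_pos hdc]
        have : ¬ c ≤ d := not_le.mpr hdc
        simp [this]
      · have hcd : c ≤ d := not_lt.mp hdc
        rw [if_neg hdc]
        split_ifs <;> simp [ih, hcd]

theorem specA_fst1 (mode : Int) (hm : ¬ mode = 2) :
    ∀ (cs : List Char) (prev : Option Char) (hasRep : Bool),
    pvNonDec cs = true → (specA mode prev cs hasRep).1 = (hasRep || pvF1 cs) := by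
  intro cs
  induction cs with
  | nil => intro prev h _; simp [specA, pvF1]
  | cons c tl ih =>
    intro prev h hch
    cases tl with
    | nil => simp [specA, pvF1]
    | cons d rest =>
      rw [pvNonDec, Bool.and_eq_true, decide_eq_true_eq] at hch
      have hdc : ¬ d < c := not_lt.mpr hch.1
      simp only [specA, if_neg hdc]
      by_cases hcd : c = d
      · rw [if_pos hcd, if_neg hm, ih _ _ hch.2]
        simp [pvF1, hcd]
      · rw [if_neg hcd, ih _ _ hch.2]
        have hne : (c == d) = false := beq_eq_false_iff_ne.mpr hcd
        simp [pvF1, hne]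

theorem specA_fst2 (mode : Int) (hm : mode = 2) :
    ∀ (cs : List Char) (prev : Option Char) (hasRep : Bool),
    pvNonDec cs = true → (specA mode prev cs hasRep).1 = (hasRep || pvF2 prev cs) := by
  intro cs
  induction cs with
  | nil => intro prev h _; simp [specA, pvF2]
  | cons c tl ih =>
    intro prev h hch
    cases tl with
    | nil => simp [specA, pvF2]
    | cons d rest =>
      rw [pvNonDec, Bool.and_eq_true, decide_eq_true_eq] at hch
      have hdc : ¬ d < c := not_lt.mpr hch.1
      simp only [specA, if_neg hdc, pvF2]
      by_cases hcd : c = d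
      · rw [if_pos hcd, if_pos hm]
        by_cases h1 : rest.head? = some c
        · rw [if_pos h1, ih _ _ hch.2]
          simp [h1]
        · rw [if_neg h1]
          by_cases h2 : prev = some c
          · rw [if_pos h2, ih _ _ hch.2]
            simp [h2]
          · rw [if_neg h2, ih _ _ hch.2]
            subst hcd
            simp [h1, h2]
      · rw [if_neg hcd, ih _ _ hch.2]
        have hne : (c == d) = false := beq_eq_false_iff_ne.mpr hcd
        simp [hne]

theorem runsAux_any_ge (rest : List Char) : ∀ (c : Char) (n : Nat), 1 ≤ n →
    (pvRunsAux c n rest).any (fun run => decide (2 ≤ run)) = (decide (2 ≤ n) || pvF1 (c :: rest)) := by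
  induction rest with
  | nil => intro c n _; simp [pvRunsAux, pvF1]
  | cons d rest' ih =>
    intro c n hn
    by_cases hdc : d = c
    · subst hdc
      rw [pvRunsAux, if_pos rfl, ih d (n + 1) (by omega)]
      have h2 : decide (2 ≤ n + 1) = true := decide_eq_true (by omega)
      rw [h2]
      simp [pvF1]
    · rw [pvRunsAux, if_neg hdc, List.any_cons, ih d 1 (le_refl 1)]
      have hne : (c == d) = false := beq_eq_false_iff_ne.mpr (fun e => hdc e.symm)
      simp [pvF1, hne]

theorem runsAux_any_eq2 (rest : List Char) : ∀ (c : Char) (n : Nat) (prev : Option Char),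
    1 ≤ n → ((prev == some c) = decide (2 ≤ n)) →
    (pvRunsAux c n rest).any (fun run => run == 2)
      = (((n == 2) && !(rest.head? == some c)) || pvF2 prev (c :: rest)) := by
  induction rest with
  | nil =>
    intro c n prev _ _
    simp [pvRunsAux, pvF2]
  | cons d rest' ih =>
    intro c n prev hn hp
    by_cases hdc : d = c
    · subst hdc
      rw [pvRunsAux, if_pos rfl,
        ih d (n + 1) (some d) (by omega)
          (by have h21 : (2 ≤ n + 1) := by omega
              simp [h21])]
      have hb1 : (!(prev == some d)) = ((n + 1 : Nat) == 2) := by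
        rw [hp]
        by_cases e : n = 1
        · subst e; rfl
        · have e1 : 2 ≤ n := by omega
          have e2 : ¬ (n + 1 = 2) := by omega
          simp [e1, e]
      simp only [pvF2, List.head?_cons, beq_self_eq_true, Bool.not_true, Bool.and_false,
        Bool.false_or, Bool.true_and, hb1]
      cases hq : ((n + 1 : Nat) == 2) <;> cases hh : (rest'.head? == some d) <;> simp
    · rw [pvRunsAux, if_neg hdc, List.any_cons,
        ih d 1 (some c) (le_refl 1)
          (by have : (some c == some d) = false :=
                beq_eq_false_iff_ne.mpr (fun e => hdc (Option.some.inj e).symm)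
              simp [this])]
      have hc1 : (c == d) = false := beq_eq_false_iff_ne.mpr (fun e => hdc e.symm)
      have hdcb : (some d == some c) = false :=
        beq_eq_false_iff_ne.mpr (fun e => hdc (Option.some.inj e))
      simp only [pvF2, List.head?_cons, hc1, hdcb, Bool.not_false, Bool.and_true,
        Bool.false_and, Bool.false_or]
      cases (n == 2) <;> simp

theorem pvNonDec_iff_chain : ∀ (cs : List Char),
    pvNonDec cs = true ↔ List.IsChain (· ≤ ·) cs := by
  intro cs
  induction cs with
  | nil => simp [pvNonDec]
  | cons c tl ih =>
    cases tl with
    | nil => simp [pvNonDec]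
    | cons d rest =>
      rw [List.isChain_cons_cons, ← ih, pvNonDec, Bool.and_eq_true, decide_eq_true_eq]

theorem sorted_eq_iff_nondec (cs : List Char) :
    cs = PySem.List.sorted cs (fun c => c) false ↔ pvNonDec cs = true := by
  constructor
  · intro h
    have hp := PySem.List.sorted_pairwise (xs := cs) (key := fun c : Char => c)
    rw [← h] at hp
    exact (pvNonDec_iff_chain cs).mpr hp.isChain
  · intro h
    have hp : cs.Pairwise (fun a b : Char => a ≤ b) :=
      List.isChain_iff_pairwise.mp ((pvNonDec_iff_chain cs).mp h)
    exact (PySem.List.sorted_eq_self_of_pairwise cs (fun c : Char => c) hp).symm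

theorem main_lemma (cs : List Char) (mode : Int) :
    ((pvA_loop cs mode cs.length 0 false).1 && (pvA_loop cs mode cs.length 0 false).2)
      = (if cs ≠ PySem.List.sorted cs (fun c => c) false then false
         else if mode = 2 then (pvRunLengths cs).any (fun run => run == 2)
         else (pvRunLengths cs).any (fun run => decide (2 ≤ run))) := by
  have hb := bridge mode cs [] false
  simp only [List.nil_append, List.length_nil, List.getLast?_nil] at hb
  cases hch : pvNonDec cs with
  | false =>
    have hs : cs ≠ PySem.List.sorted cs (fun c => c) false := by
      intro e
      have := (sorted_eq_iff_nondec cs).mp e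
      rw [hch] at this
      exact absurd this (by decide)
    rw [if_pos hs, hb, specA_snd, hch, Bool.and_false]
  | true =>
    have hs : cs = PySem.List.sorted cs (fun c => c) false := (sorted_eq_iff_nondec cs).mpr hch
    rw [if_neg (not_not_intro hs), hb, specA_snd, hch, Bool.and_true]
    by_cases hm : mode = 2
    · rw [if_pos hm, specA_fst2 mode hm cs none false hch]
      cases cs with
      | nil => simp [pvRunLengths, pvF2]
      | cons c rest =>
        rw [pvRunLengths, runsAux_any_eq2 rest c 1 none (le_refl 1) (by simp)]
        simp
    · rw [if_neg hm, specA_fst1 mode hm cs none false hch]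
      cases cs with
      | nil => simp [pvRunLengths, pvF1]
      | cons c rest =>
        rw [pvRunLengths, runsAux_any_ge rest c 1 (le_refl 1)]
        simp

-- ===== VERDICT (by name: the statement is the Claim_ definition above) =====
theorem check_passcode_spec : Claim_equal_check_passcode := by
  intro int_in mode _
  unfold Spec_check_passcode check_passcode check_passcode_alt
  exact main_lemma (PySem.Int.toChars int_in) mode
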